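-- pv_equiv track=rewrite | github.com/Peikos/prog-ai-v1b-24 | selection_sort.py | find_index_of_minimum
-- ===== SOURCE A (Python) =====
-- def find_index_of_minimum(lst, start_idx):
--     """Gegeven een lijst, vindt de index van de kleinste waarde, maar begin vanaf start_idx"""
--     smallest_so_far = lst[start_idx]
--     smallest_idx = start_idx
--     for i in range(start_idx, len(lst)):
--         if lst[i] < smallest_so_far:
--             smallest_so_far = lst[i]
--             smallest_idx = i
--     return smallest_idx
-- ===== SOURCE B (Python) =====
-- def find_index_of_minimum(lst, start_idx):
--     """Gegeven een lijst, vindt de index van de kleinste waarde, maar begin vanaf start_idx"""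
--     vals = [lst[i] for i in range(start_idx, len(lst))]
--     return start_idx + vals.index(min(vals))
-- ===== Notes on version B (the rewrite author's own statement) =====
-- stated objective: simpler
-- what changed: Replaces the single index-tracking scan with two separate passes over the scanned values: first min() finds the smallest value, then list.index locates its earliest position, offset by start_idx.
import Mathlib
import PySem

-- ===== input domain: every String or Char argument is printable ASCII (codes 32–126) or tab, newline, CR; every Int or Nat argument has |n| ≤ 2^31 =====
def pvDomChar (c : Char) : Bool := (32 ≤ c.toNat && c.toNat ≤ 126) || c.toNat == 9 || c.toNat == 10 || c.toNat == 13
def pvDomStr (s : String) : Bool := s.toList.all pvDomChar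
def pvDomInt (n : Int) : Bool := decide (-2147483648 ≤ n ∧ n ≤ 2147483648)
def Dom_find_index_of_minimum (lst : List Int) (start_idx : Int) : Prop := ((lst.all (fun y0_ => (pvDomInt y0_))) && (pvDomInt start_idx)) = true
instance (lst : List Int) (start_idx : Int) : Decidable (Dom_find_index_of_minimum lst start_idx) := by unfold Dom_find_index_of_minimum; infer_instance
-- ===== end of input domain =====

-- B replaces A's single index-tracking scan with two passes over the scanned values (min value, then its earliest position); objective: simpler.


-- ===== PORT A =====
def find_index_of_minimum (lst : List Int) (start_idx : Int) : Int :=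
  match PySem.List.pyGet? lst start_idx with
  | none => 0   -- IndexError: excluded by Pre_
  | some v =>
    ((PySem.List.pyRange start_idx (lst.length : Int) 1).foldl
      (fun (s : Int × Int) i =>
        if PySem.List.pyGetD lst i 0 < s.1 then (PySem.List.pyGetD lst i 0, i) else s)
      (v, start_idx)).2

-- ===== PORT B =====
def find_index_of_minimum_alt (lst : List Int) (start_idx : Int) : Int :=
  let vals := (PySem.List.pyRange start_idx (lst.length : Int) 1).map
      (fun i => PySem.List.pyGetD lst i 0)
  match PySem.List.min? vals (fun x => x) with
  | none => 0   -- ValueError on an empty scan: excluded by Pre_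
  | some m =>
    match PySem.List.index? vals m with
    | none => 0   -- unreachable: the minimum is a member of vals
    | some k => start_idx + (k : Int)

-- ===== PRECONDITION & SPEC =====
-- Exactly the inputs on which A returns: lst[start_idx] must not raise IndexError.
def Pre_find_index_of_minimum (lst : List Int) (start_idx : Int) : Prop :=
  PySem.Raise.InRange lst.length start_idx
instance (lst : List Int) (start_idx : Int) : Decidable (Pre_find_index_of_minimum lst start_idx) := by
  unfold Pre_find_index_of_minimum; infer_instance
def pvWitness_find_index_of_minimum : List Int × Int := ([3, 1, 2], 1)

def Spec_find_index_of_minimum (lst : List Int) (start_idx : Int) (out : Int) : Prop := out = find_index_of_minimum_alt lst start_idx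
instance (lst : List Int) (start_idx : Int) (out : Int) : Decidable (Spec_find_index_of_minimum lst start_idx out) := by unfold Spec_find_index_of_minimum; infer_instance

-- ===== CLAIM (what is proved, stated in full; the proofs are below) =====
def Claim_equal_find_index_of_minimum : Prop := ∀ (lst : List Int) (start_idx : Int), Dom_find_index_of_minimum lst start_idx → Pre_find_index_of_minimum lst start_idx → Spec_find_index_of_minimum lst start_idx (find_index_of_minimum lst start_idx)

-- ===== LEMMAS AND PROOFS =====

-- A's loop, restated structurally over the list of scanned values with an index counter.
def pvLoop (t : List Int) (a : Int) (s : Int × Int) : Int × Int :=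
  match t with
  | [] => s
  | x :: r => pvLoop r (a + 1) (if x < s.1 then (x, a) else s)

lemma pvFoldlMin_le_init (r : List Int) (c : Int) : List.foldl min c r ≤ c := by
  induction r generalizing c with
  | nil => simp
  | cons x r ih => exact le_trans (ih (min c x)) (min_le_left c x)

lemma pvIdxOf?_of_mem (xs : List Int) (v : Int) (h : v ∈ xs) :
    List.idxOf? v xs = some (xs.idxOf v) := by
  induction xs with
  | nil => simp at h
  | cons x r ih =>
    by_cases hx : x = v
    · subst hx; simp [List.idxOf?_cons, List.idxOf_cons_self]
    · have hr : v ∈ r := by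
        cases h with
        | head => exact absurd rfl hx
        | tail _ hh => exact hh
      rw [List.idxOf_cons_ne _ hx]
      simp only [List.idxOf?_cons, beq_iff_eq, hx, if_false]
      rw [ih hr]
      rfl

-- invariant characterisation of A's loop
lemma pvLoop_spec (t : List Int) : ∀ (a cur ci : Int),
    pvLoop t a (cur, ci) =
      if List.foldl min cur t < cur then
        (List.foldl min cur t, a + (t.idxOf (List.foldl min cur t) : Int))
      else (cur, ci) := by
  induction t with
  | nil => intro a cur ci; simp [pvLoop]
  | cons x r ih =>
    intro a cur ci
    simp only [pvLoop, List.foldl_cons]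
    by_cases hx : x < cur
    · rw [if_pos hx, min_eq_right hx.le, ih (a + 1) x a]
      have hle : List.foldl min x r ≤ x := pvFoldlMin_le_init r x
      by_cases h2 : List.foldl min x r < x
      · rw [if_pos h2, if_pos (lt_trans h2 hx)]
        have hne : x ≠ List.foldl min x r := (ne_of_lt h2).symm
        rw [List.idxOf_cons_ne _ hne]
        simp only [Nat.succ_eq_add_one]
        push_cast
        ring_nf
      · have hx2 : List.foldl min x r = x := le_antisymm hle (not_lt.mp h2)
        rw [if_neg h2, hx2, if_pos hx, List.idxOf_cons_self]
        simp
    · rw [if_neg hx, min_eq_left (not_lt.mp hx), ih (a + 1) cur ci]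
      by_cases h2 : List.foldl min cur r < cur
      · rw [if_pos h2, if_pos h2]
        have hne : x ≠ List.foldl min cur r :=
          (ne_of_lt (lt_of_lt_of_le h2 (not_lt.mp hx))).symm
        rw [List.idxOf_cons_ne _ hne]
        simp only [Nat.succ_eq_add_one]
        push_cast
        ring_nf
      · rw [if_neg h2, if_neg h2]

-- A's indexed fold over the range equals the structural loop over the mapped values
lemma pvBridge (lst : List Int) (b : Int) : ∀ (a : Int) (init : Int × Int),
    (PySem.List.pyRange a b 1).foldl
      (fun (s : Int × Int) i =>
        if PySem.List.pyGetD lst i 0 < s.1 then (PySem.List.pyGetD lst i 0, i) else s) init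
    = pvLoop ((PySem.List.pyRange a b 1).map (fun i => PySem.List.pyGetD lst i 0)) a init := by
  intro a init
  generalize hn : (b - a).toNat = n
  induction n generalizing a init with
  | zero =>
    rw [PySem.List.pyRange_one_eq_nil (by omega)]
    rfl
  | succ n ih =>
    rw [PySem.List.pyRange_one_cons (by omega)]
    simp only [List.foldl_cons, List.map_cons, pvLoop]
    exact ih (a + 1) _ (by omega)

-- ===== VERDICT (by name: the statement is the Claim_ definition above) =====
theorem find_index_of_minimum_spec : Claim_equal_find_index_of_minimum := by
  intro lst start_idx _ hpre
  unfold Spec_find_index_of_minimum find_index_of_minimum find_index_of_minimum_alt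
  -- the scan is nonempty and starts with lst[start_idx]
  obtain ⟨hlo, hhi⟩ := hpre
  obtain ⟨v, hget⟩ : ∃ v, PySem.List.pyGet? lst start_idx = some v := by
    rcases h : PySem.List.pyGet? lst start_idx with _ | v
    · rw [PySem.List.pyGet?_eq_none_iff] at h
      exact absurd ⟨hlo, hhi⟩ h
    · exact ⟨v, rfl⟩
  have hgetD : PySem.List.pyGetD lst start_idx 0 = v := by
    simp [PySem.List.pyGetD, hget]
  have hcons : PySem.List.pyRange start_idx (lst.length : Int) 1
      = start_idx :: PySem.List.pyRange (start_idx + 1) (lst.length : Int) 1 :=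
    PySem.List.pyRange_one_cons hhi
  set r := (PySem.List.pyRange (start_idx + 1) (lst.length : Int) 1).map
      (fun i => PySem.List.pyGetD lst i 0) with hr
  have hvals : (PySem.List.pyRange start_idx (lst.length : Int) 1).map
      (fun i => PySem.List.pyGetD lst i 0) = v :: r := by
    rw [hcons, List.map_cons, hgetD]
  set m := List.foldl min v r with hm
  have hmin : PySem.List.min? (v :: r) (fun y => y) = some m :=
    PySem.List.min?_id_cons v r
  have hmem : m ∈ v :: r := PySem.List.min?_mem hmin
  have hindex : PySem.List.index? (v :: r) m = some ((v :: r).idxOf m) := by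
    rw [PySem.List.index?_eq_idxOf?]
    exact pvIdxOf?_of_mem (v :: r) m hmem
  simp only [hget, hvals, hmin, hindex]
  rw [pvBridge lst (lst.length : Int) start_idx (v, start_idx), hvals,
    pvLoop_spec (v :: r) start_idx v start_idx]
  have hfold : List.foldl min v (v :: r) = m := by
    simp only [List.foldl_cons, min_self, hm]
  rw [hfold]
  have hle : m ≤ v := pvFoldlMin_le_init r v
  by_cases h2 : m < v
  · rw [if_pos h2]
  · have hmv : m = v := le_antisymm hle (not_lt.mp h2)
    rw [if_neg h2]
    have hz : (v :: r).idxOf m = 0 := by rw [hmv]; exact List.idxOf_cons_self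
    rw [hz]
    simp
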